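-- pv_equiv track=rewrite | github.com/SoutoSebastian/GuiasAlgo | Python/guia7.py | esMatriz
-- ===== SOURCE A (Python) =====
-- def esMatriz (s:[[int]])->bool:
--     res: bool = True
--     if (len(s) == 0 or len(s[0]) == 0):
--         res = False
--     for i in range(len(s)):
--         if (len(s[0]) != len(s[i])):
--             res = False
--     return res
-- ===== SOURCE B (Python) =====
-- def esMatriz(s):
--     lengths = {len(row) for row in s}
--     return len(s) != 0 and len(lengths) == 1 and 0 not in lengths
-- ===== Notes on version B (the rewrite author's own statement) =====
-- stated objective: idiomatic
-- what changed: Instead of comparing every row's length against s[0] with a running boolean flag, B collects the distinct row lengths into a set in one comprehension and decides the answer from the set's cardinality and whether it contains 0, never indexing s[0].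
import Mathlib
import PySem

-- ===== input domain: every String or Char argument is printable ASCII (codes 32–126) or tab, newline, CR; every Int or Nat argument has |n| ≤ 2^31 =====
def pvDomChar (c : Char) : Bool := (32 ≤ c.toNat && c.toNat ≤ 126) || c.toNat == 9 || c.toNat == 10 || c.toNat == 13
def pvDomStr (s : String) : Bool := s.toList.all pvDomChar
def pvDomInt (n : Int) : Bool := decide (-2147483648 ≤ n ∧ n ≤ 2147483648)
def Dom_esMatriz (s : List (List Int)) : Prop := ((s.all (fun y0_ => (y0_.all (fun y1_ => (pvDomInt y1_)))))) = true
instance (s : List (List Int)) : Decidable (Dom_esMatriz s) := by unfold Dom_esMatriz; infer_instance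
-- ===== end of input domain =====

-- B decides the result from the set of distinct row lengths instead of A's flag-and-compare-to-s[0] loop (idiomatic; same return value).
-- ===== PORT A =====
-- Python's 'or' short-circuits: s[0] is reached only when len(s) ≠ 0, so headD [] is exact here
def esMatriz (s : List (List Int)) : Bool :=
  let res := true
  let res := if s.length = 0 ∨ (s.headD []).length = 0 then false else res
  (PySem.List.pyRange 0 (s.length : Int) 1).foldl
    (fun res i =>
      if (PySem.List.pyGetD s 0 []).length ≠ (PySem.List.pyGetD s i []).length then false
      else res) res

-- ===== PORT B =====
def esMatriz_alt (s : List (List Int)) : Bool :=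
  let lengths : PySem.Set Int := PySem.Set.ofList (s.map (fun row => (row.length : Int)))
  decide (s.length ≠ 0) && (PySem.Set.len lengths == 1) && !(PySem.Set.contains lengths 0)

-- ===== PRECONDITION & SPEC =====
def Spec_esMatriz (s : List (List Int)) (out : Bool) : Prop := out = esMatriz_alt s
instance (s : List (List Int)) (out : Bool) : Decidable (Spec_esMatriz s out) := by unfold Spec_esMatriz; infer_instance

-- ===== CLAIM (what is proved, stated in full; the proofs are below) =====
def Claim_equal_esMatriz : Prop := ∀ (s : List (List Int)), Dom_esMatriz s → Spec_esMatriz s (esMatriz s)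

-- ===== LEMMAS AND PROOFS =====

-- ===== VERDICT (by name: the statement is the Claim_ definition above) =====
-- A's loop: folding 'set to false when P holds' computes b && all ¬P
theorem foldl_if_false {α : Type} (P : α → Prop) [DecidablePred P] :
    ∀ (l : List α) (b : Bool),
      l.foldl (fun res v => if P v then false else res) b = (b && l.all (fun v => !decide (P v))) := by
  intro l
  induction l with
  | nil => intro b; simp
  | cons x xs ih =>
    intro b
    simp only [List.foldl_cons, List.all_cons, ih]
    by_cases h : P x <;> simp [h]

theorem const_foldl_add (a : Int) :
    ∀ xs : List Int, (∀ x ∈ xs, x = a) → xs.foldl PySem.Set.add [a] = [a] := by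
  intro xs
  induction xs with
  | nil => intro _; rfl
  | cons y ys ih =>
    intro h
    have hy : y = a := h y (by simp)
    have : PySem.Set.add [a] y = [a] := by
      subst hy; simp [PySem.Set.add, PySem.Set.contains]
    simp only [List.foldl_cons, this]
    exact ih (fun x hx => h x (by simp [hx]))

theorem ofList_const (a : Int) (xs : List Int) (h : ∀ x ∈ xs, x = a) :
    PySem.Set.ofList (a :: xs) = [a] := by
  rw [PySem.Set.ofList_eq_foldl]
  simp only [List.foldl_cons]
  have : PySem.Set.add ([] : List Int) a = [a] := rfl
  rw [this]
  exact const_foldl_add a xs h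

theorem esMatriz_spec : Claim_equal_esMatriz := by
  intro s _
  unfold Spec_esMatriz esMatriz esMatriz_alt
  cases s with
  | nil => decide
  | cons h t =>
    simp only []
    rw [PySem.List.foldl_pyRange_zero_pyGetD' (h :: t) []
          (fun res v => if (PySem.List.pyGetD (h :: t) 0 []).length ≠ v.length then false else res)]
    rw [foldl_if_false (fun (v : List Int) => (PySem.List.pyGetD (h :: t) 0 []).length ≠ v.length)]
    simp only [PySem.List.pyGetD_zero_cons]
    by_cases hall : ∀ r ∈ t, r.length = h.length
    · have hset : PySem.Set.ofList ((h :: t).map (fun row => (row.length : Int))) = [(h.length : Int)] := by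
        simp only [List.map_cons]
        apply ofList_const
        intro x hx
        simp only [List.mem_map] at hx
        obtain ⟨r, hr, hrx⟩ := hx
        rw [← hrx, hall r hr]
      rw [hset]
      have hallb : (h :: t).all (fun v => !decide (¬h.length = v.length)) = true := by
        rw [List.all_eq_true]
        intro v hv
        rcases List.mem_cons.1 hv with rfl | hv'
        · simp
        · simp [hall v hv']
      rw [hallb]
      by_cases h0 : h.length = 0
      · simp [h0, PySem.Set.contains, PySem.Set.len]
      · simp [h0, PySem.Set.contains, PySem.Set.len]
        omega
    · push Not at hall
      obtain ⟨r, hr, hne⟩ := hall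
      have hA : (h :: t).all (fun v => !decide (¬h.length = v.length)) = false := by
        rw [List.all_eq_false]
        exact ⟨r, by simp [hr], by simpa using Ne.symm hne⟩
      rw [hA, Bool.and_false]
      -- B is false: the set contains two distinct lengths, so its size is not 1
      have hmem1 : (h.length : Int) ∈ PySem.Set.ofList ((h :: t).map (fun row => (row.length : Int))) := by
        rw [PySem.Set.mem_ofList]; exact List.mem_map.2 ⟨h, by simp, rfl⟩
      have hmem2 : (r.length : Int) ∈ PySem.Set.ofList ((h :: t).map (fun row => (row.length : Int))) := by
        rw [PySem.Set.mem_ofList]; exact List.mem_map.2 ⟨r, by simp [hr], rfl⟩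
      have hne' : (h.length : Int) ≠ (r.length : Int) := by
        intro hc; apply hne; exact_mod_cast hc.symm
      have hlen : PySem.Set.len (PySem.Set.ofList ((h :: t).map (fun row => (row.length : Int)))) ≠ 1 := by
        intro hc
        -- a one-element list cannot contain two distinct elements
        cases hset : PySem.Set.ofList ((h :: t).map (fun row => (row.length : Int))) with
        | nil => rw [hset] at hmem1; exact absurd hmem1 (by simp)
        | cons a l =>
          rw [hset] at hc hmem1 hmem2
          have hl : l = [] := by simpa [PySem.Set.len] using hc
          subst hl
          simp at hmem1 hmem2
          exact hne' (hmem1.trans hmem2.symm)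
      have hlenb : (PySem.Set.len (PySem.Set.ofList ((h :: t).map (fun row => (row.length : Int)))) == 1) = false := by
        simpa using hlen
      rw [hlenb, Bool.and_false, Bool.false_and]
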